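-- pv_equiv track=rewrite | github.com/Beliavsky/Pure-Fortran | xr2f.py | _split_top_level_else
-- ===== SOURCE A (Python) =====
-- def _split_top_level_else(text: str) -> tuple[str, str] | None:
--     """Split `A else B` at top level, outside strings/parentheses."""
--     in_single = False
--     in_double = False
--     esc = False
--     depth = 0
--     i = 0
--     while i < len(text):
--         ch = text[i]
--         if esc:
--             esc = False
--             i += 1
--             continue
--         if ch == "\\":
--             esc = True
--             i += 1
--             continue
--         if ch == "'" and not in_double:
--             in_single = not in_single
--             i += 1
--             continue
--         if ch == '"' and not in_single:
--             in_double = not in_double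
--             i += 1
--             continue
--         if not in_single and not in_double:
--             if ch == "(":
--                 depth += 1
--             elif ch == ")" and depth > 0:
--                 depth -= 1
--             elif depth == 0 and text[i : i + 5] == " else":
--                 left = text[:i].strip()
--                 right = text[i + 5 :].strip()
--                 if left and right:
--                     return left, right
--         i += 1
--     return None
-- ===== SOURCE B (Python) =====
-- def _is_top_level(text, idx):
--     """State of A-style scanner just before position idx: top level iff
--     not escaped, not inside quotes, paren depth zero."""
--     in_single = False
--     in_double = False
--     esc = False
--     depth = 0
--     for ch in text[:idx]:
--         if esc:
--             esc = False
--         elif ch == "\\":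
--             esc = True
--         elif ch == "'" and not in_double:
--             in_single = not in_single
--         elif ch == '"' and not in_single:
--             in_double = not in_double
--         elif in_single or in_double:
--             pass
--         elif ch == "(":
--             depth += 1
--         elif ch == ")" and depth > 0:
--             depth -= 1
--     return not esc and not in_single and not in_double and depth == 0
--
--
-- def _split_top_level_else(text: str) -> tuple[str, str] | None:
--     """Split `A else B` at top level, outside strings/parentheses."""
--     start = 0
--     while True:
--         idx = text.find(" else", start)
--         if idx == -1:
--             return None
--         if _is_top_level(text, idx):
--             left = text[:idx].strip()
--             right = text[idx + 5:].strip()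
--             if left and right:
--                 return left, right
--         start = idx + 1
-- ===== Notes on version B (the rewrite author's own statement) =====
-- stated objective: alternative
-- what changed: B replaces A's single stateful character-by-character scan (slice test at every position) with repeated str.find(' else', start) to jump between candidate occurrences, validating each candidate by folding the quote/paren/escape state machine over the prefix.
import Mathlib
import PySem

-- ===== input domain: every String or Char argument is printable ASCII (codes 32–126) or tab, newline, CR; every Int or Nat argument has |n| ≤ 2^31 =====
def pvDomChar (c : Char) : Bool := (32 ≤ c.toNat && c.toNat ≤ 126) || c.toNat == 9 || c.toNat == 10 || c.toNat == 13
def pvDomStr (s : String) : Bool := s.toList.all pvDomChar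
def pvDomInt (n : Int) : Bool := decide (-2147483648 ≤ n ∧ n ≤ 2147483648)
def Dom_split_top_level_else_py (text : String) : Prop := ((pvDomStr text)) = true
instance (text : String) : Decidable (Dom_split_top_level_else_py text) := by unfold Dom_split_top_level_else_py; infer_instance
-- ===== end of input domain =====

-- B replaces A's single stateful scan by repeated find(" else", start) plus a prefix-fold
-- validation of each candidate; alternative decomposition, not claimed faster.

-- ===== PORT A =====
-- A's while-loop, step for step; text[i:i+5] = (cs.drop i).take 5 and text[:i] = cs.take i,
-- text[i+5:] = cs.drop (i+5) (exact for these nonnegative in-range indices, PySem.List.slice_natCast).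
def pvGoA (cs : List Char) (fuel : Nat) (i : Nat) (insg ind esc : Bool) (depth : Int) :
    Option (String × String) :=
  match fuel with
  | 0 => none
  | fuel + 1 =>
  if h : i < cs.length then
    let ch := cs[i]
    if esc then pvGoA cs fuel (i+1) insg ind false depth
    else if ch = '\\' then pvGoA cs fuel (i+1) insg ind true depth
    else if ch = '\'' ∧ ¬ ind = true then pvGoA cs fuel (i+1) (!insg) ind esc depth
    else if ch = '"' ∧ ¬ insg = true then pvGoA cs fuel (i+1) insg (!ind) esc depth
    else if ¬ insg = true ∧ ¬ ind = true then
      if ch = '(' then pvGoA cs fuel (i+1) insg ind esc (depth+1)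
      else if ch = ')' ∧ depth > 0 then pvGoA cs fuel (i+1) insg ind esc (depth-1)
      else if depth = 0 ∧ (cs.drop i).take 5 = " else".toList then
        let left := PySem.Chars.strip (cs.take i)
        let right := PySem.Chars.strip (cs.drop (i+5))
        if left ≠ [] ∧ right ≠ [] then some (String.ofList left, String.ofList right)
        else pvGoA cs fuel (i+1) insg ind esc depth
      else pvGoA cs fuel (i+1) insg ind esc depth
    else pvGoA cs fuel (i+1) insg ind esc depth
  else none

def split_top_level_else_py (text : String) : Option (String × String) :=
  pvGoA text.toList (text.toList.length + 1) 0 false false false 0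

-- ===== PORT B =====
-- Source B's _is_top_level: fold the state machine over text[:idx], then test the state.
def pvStep (st : Bool × Bool × Bool × Int) (ch : Char) : Bool × Bool × Bool × Int :=
  match st with
  | (insg, ind, esc, depth) =>
    if esc then (insg, ind, false, depth)
    else if ch = '\\' then (insg, ind, true, depth)
    else if ch = '\'' ∧ ¬ ind = true then (!insg, ind, esc, depth)
    else if ch = '"' ∧ ¬ insg = true then (insg, !ind, esc, depth)
    else if insg = true ∨ ind = true then (insg, ind, esc, depth)
    else if ch = '(' then (insg, ind, esc, depth+1)
    else if ch = ')' ∧ depth > 0 then (insg, ind, esc, depth-1)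
    else (insg, ind, esc, depth)

def pvIsTopLevel (cs : List Char) (idx : Nat) : Bool :=
  match (cs.take idx).foldl pvStep (false, false, false, 0) with
  | (insg, ind, esc, depth) => !esc && !insg && !ind && depth == 0

-- Source B's while loop: text.find(" else", start) = PySem.Chars.findFrom; the fuel bound
-- (one unit per loop iteration, start strictly increases) only makes the recursion structural.
def pvGoB (cs : List Char) (fuel : Nat) (start : Nat) : Option (String × String) :=
  match fuel with
  | 0 => none
  | fuel + 1 =>
    let r := PySem.Chars.findFrom cs " else".toList (start : Int) none
    if r = -1 then none
    else
      let idx := r.toNat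
      if pvIsTopLevel cs idx ∧
          PySem.Chars.strip (cs.take idx) ≠ [] ∧ PySem.Chars.strip (cs.drop (idx+5)) ≠ [] then
        some (String.ofList (PySem.Chars.strip (cs.take idx)),
              String.ofList (PySem.Chars.strip (cs.drop (idx+5))))
      else pvGoB cs fuel (idx+1)

def split_top_level_else_py_alt (text : String) : Option (String × String) :=
  pvGoB text.toList (text.toList.length + 1) 0

-- ===== PRECONDITION & SPEC =====
def Spec_split_top_level_else_py (text : String) (out : Option (String × String)) : Prop := out = split_top_level_else_py_alt text
instance (text : String) (out : Option (String × String)) : Decidable (Spec_split_top_level_else_py text out) := by unfold Spec_split_top_level_else_py; infer_instance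

-- ===== CLAIM (what is proved, stated in full; the proofs are below) =====
def Claim_equal_split_top_level_else_py : Prop := ∀ (text : String), Dom_split_top_level_else_py text → Spec_split_top_level_else_py text (split_top_level_else_py text)

-- ===== LEMMAS AND PROOFS =====

-- The common specification both loops are reduced to: the first index j (in increasing
-- order) that is top level, starts " else", and has nonempty stripped sides.
def pvP (cs : List Char) (j : Nat) : Bool :=
  pvIsTopLevel cs j && decide (" else".toList <+: cs.drop j)
    && decide (PySem.Chars.strip (cs.take j) ≠ [])
    && decide (PySem.Chars.strip (cs.drop (j+5)) ≠ [])

def pvRes (cs : List Char) (j : Nat) : Option (String × String) :=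
  some (String.ofList (PySem.Chars.strip (cs.take j)),
        String.ofList (PySem.Chars.strip (cs.drop (j+5))))

def pvFind (cs : List Char) (i : Nat) : Option Nat :=
  (List.range' i (cs.length - i)).find? (pvP cs)

def pvSpec (cs : List Char) (i : Nat) : Option (String × String) :=
  match pvFind cs i with
  | none => none
  | some j => pvRes cs j

theorem pvSpec_ge (cs : List Char) (i : Nat) (h : cs.length ≤ i) : pvSpec cs i = none := by
  have : cs.length - i = 0 := by omega
  simp [pvSpec, pvFind, this]

theorem pvSpec_step (cs : List Char) (i : Nat) (h : i < cs.length) :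
    pvSpec cs i = if pvP cs i then pvRes cs i else pvSpec cs (i+1) := by
  have hn : cs.length - i = (cs.length - (i+1)) + 1 := by omega
  simp only [pvSpec, pvFind, hn, List.range'_succ, List.find?_cons]
  cases hp : pvP cs i <;> simp

theorem pvSpec_skip (cs : List Char) (i m : Nat) (him : i ≤ m)
    (hall : ∀ j, i ≤ j → j < m → pvP cs j = false) : pvSpec cs i = pvSpec cs m := by
  induction m with
  | zero =>
    have : i = 0 := by omega
    subst this; rfl
  | succ m ih =>
    rcases Nat.eq_or_lt_of_le him with rfl | hlt
    · rfl
    · have him' : i ≤ m := by omega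
      rw [ih him' (fun j hj1 hj2 => hall j hj1 (by omega))]
      by_cases hm : m < cs.length
      · rw [pvSpec_step cs m hm, hall m him' (by omega)]; simp
      · rw [pvSpec_ge cs m (by omega), pvSpec_ge cs (m+1) (by omega)]

theorem pvP_false_of_not_prefix (cs : List Char) (i : Nat)
    (h : ¬ (" else".toList <+: cs.drop i)) : pvP cs i = false := by
  have h' : decide (" else".toList <+: cs.drop i) = false := decide_eq_false h
  simp only [pvP, h', Bool.and_false, Bool.false_and]

theorem pvP_false_of_not_top (cs : List Char) (i : Nat)
    (h : pvIsTopLevel cs i = false) : pvP cs i = false := by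
  simp only [pvP, h, Bool.false_and]

-- state at i+1 = step of state at i
theorem pvFold_succ (cs : List Char) (i : Nat) (h : i < cs.length) :
    (cs.take (i+1)).foldl pvStep (false, false, false, 0)
      = pvStep ((cs.take i).foldl pvStep (false, false, false, 0)) cs[i] := by
  have ht : cs.take (i+1) = cs.take i ++ [cs[i]] := by
    rw [List.take_add_one]
    simp [List.getElem?_eq_getElem h]
  rw [ht, List.foldl_append, List.foldl_cons, List.foldl_nil]

-- if cs[i] is not ' ', the pattern cannot start at i
theorem pvNotMatch (cs : List Char) (i : Nat) (h : i < cs.length) (hch : cs[i] ≠ ' ') :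
    ¬ (" else".toList <+: cs.drop i) := by
  intro hpre
  rw [List.drop_eq_getElem_cons h] at hpre
  rcases hpre with ⟨t, ht⟩
  have h3 := congrArg List.head? ht
  simp [List.getElem?_eq_getElem h] at h3
  exact hch h3.symm

theorem pvPrefix_iff (cs : List Char) (i : Nat) :
    (cs.drop i).take 5 = " else".toList ↔ (" else".toList <+: cs.drop i) := by
  constructor
  · intro h; exact h ▸ List.take_prefix 5 (cs.drop i)
  · intro h
    have h2 := (List.prefix_iff_eq_take.mp h).symm
    simpa using h2

-- A's loop computes pvSpec, given that its carried state is the fold of the prefix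
theorem pvGoA_spec (cs : List Char) (fuel : Nat) (i : Nat) (insg ind esc : Bool) (depth : Int)
    (hf : cs.length < i + fuel)
    (hst : (cs.take i).foldl pvStep (false, false, false, 0) = (insg, ind, esc, depth)) :
    pvGoA cs fuel i insg ind esc depth = pvSpec cs i := by
  match fuel with
  | 0 =>
    rw [pvGoA, pvSpec_ge cs i (by omega)]
  | fuel + 1 =>
  by_cases h : i < cs.length
  · have htop : pvIsTopLevel cs i = (!esc && !insg && !ind && depth == 0) := by
      simp only [pvIsTopLevel, hst]
    have hnext : ∀ st', pvStep (insg, ind, esc, depth) cs[i] = st' →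
        (cs.take (i+1)).foldl pvStep (false, false, false, 0) = st' := by
      intro st' hst'
      rw [pvFold_succ cs i h, hst, hst']
    rw [pvSpec_step cs i h]
    rw [pvGoA]; simp only [h, dite_true]
    by_cases hesc : esc = true
    · subst hesc
      rw [if_pos rfl,
        pvP_false_of_not_top cs i (by rw [htop]; simp), if_neg Bool.false_ne_true]
      exact pvGoA_spec cs fuel (i+1) insg ind false depth
        (by omega) (hnext _ (by simp [pvStep]))
    · have hesc0 : esc = false := by
        cases esc
        · rfl
        · exact absurd rfl hesc
      subst hesc0
      rw [if_neg Bool.false_ne_true]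
      by_cases hbs : cs[i] = '\\'
      · rw [if_pos hbs,
          pvP_false_of_not_prefix cs i (pvNotMatch cs i h (by simp [hbs])),
          if_neg Bool.false_ne_true]
        exact pvGoA_spec cs fuel (i+1) insg ind true depth
          (by omega) (hnext _ (by simp only [pvStep]; rw [if_neg Bool.false_ne_true, if_pos hbs]))
      · rw [if_neg hbs]
        by_cases hq1 : cs[i] = '\'' ∧ ¬ ind = true
        · rw [if_pos hq1,
            pvP_false_of_not_prefix cs i (pvNotMatch cs i h (by simp [hq1.1])),
            if_neg Bool.false_ne_true]
          exact pvGoA_spec cs fuel (i+1) (!insg) ind false depth (by omega)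
            (hnext _ (by
              simp only [pvStep]
              rw [if_neg Bool.false_ne_true, if_neg hbs, if_pos hq1]))
        · rw [if_neg hq1]
          by_cases hq2 : cs[i] = '"' ∧ ¬ insg = true
          · rw [if_pos hq2,
              pvP_false_of_not_prefix cs i (pvNotMatch cs i h (by simp [hq2.1])),
              if_neg Bool.false_ne_true]
            exact pvGoA_spec cs fuel (i+1) insg (!ind) false depth (by omega)
              (hnext _ (by
                simp only [pvStep]
                rw [if_neg Bool.false_ne_true, if_neg hbs, if_neg hq1, if_pos hq2]))
          · rw [if_neg hq2]
            by_cases htl : ¬ insg = true ∧ ¬ ind = true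
            · rw [if_pos htl]
              have hi : insg = false := by
                cases insg
                · rfl
                · exact absurd rfl htl.1
              have hd : ind = false := by
                cases ind
                · rfl
                · exact absurd rfl htl.2
              have hnor : ¬ (insg = true ∨ ind = true) := not_or.mpr ⟨htl.1, htl.2⟩
              by_cases hpo : cs[i] = '('
              · rw [if_pos hpo,
                  pvP_false_of_not_prefix cs i (pvNotMatch cs i h (by simp [hpo])),
                  if_neg Bool.false_ne_true]
                exact pvGoA_spec cs fuel (i+1) insg ind false (depth+1) (by omega)
                  (hnext _ (by
                    simp only [pvStep]
                    rw [if_neg Bool.false_ne_true, if_neg hbs, if_neg hq1, if_neg hq2,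
                      if_neg hnor, if_pos hpo]))
              · rw [if_neg hpo]
                by_cases hpc : cs[i] = ')' ∧ depth > 0
                · rw [if_pos hpc,
                    pvP_false_of_not_prefix cs i (pvNotMatch cs i h (by simp [hpc.1])),
                    if_neg Bool.false_ne_true]
                  exact pvGoA_spec cs fuel (i+1) insg ind false (depth-1) (by omega)
                    (hnext _ (by
                      simp only [pvStep]
                      rw [if_neg Bool.false_ne_true, if_neg hbs, if_neg hq1, if_neg hq2,
                        if_neg hnor, if_neg hpo, if_pos hpc]))
                · rw [if_neg hpc]
                  have hstep : pvStep (insg, ind, false, depth) cs[i]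
                      = (insg, ind, false, depth) := by
                    simp only [pvStep]
                    rw [if_neg Bool.false_ne_true, if_neg hbs, if_neg hq1, if_neg hq2,
                      if_neg hnor, if_neg hpo, if_neg hpc]
                  have hrec := pvGoA_spec cs fuel (i+1) insg ind false depth (by omega) (hnext _ hstep)
                  by_cases hm : depth = 0 ∧ (cs.drop i).take 5 = " else".toList
                  · rw [if_pos hm]
                    by_cases hne : PySem.Chars.strip (cs.take i) ≠ [] ∧
                        PySem.Chars.strip (cs.drop (i+5)) ≠ []
                    · rw [if_pos hne]
                      have h1 : pvIsTopLevel cs i = true := by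
                        rw [htop, hi, hd, hm.1]
                        simp
                      have hP : pvP cs i = true := by
                        have hd1 := decide_eq_true ((pvPrefix_iff cs i).mp hm.2)
                        have hd2 := decide_eq_true hne.1
                        have hd3 := decide_eq_true hne.2
                        simp only [pvP, h1, hd1, hd2, hd3, Bool.and_self]
                      rw [hP, if_pos rfl]
                      rfl
                    · rw [if_neg hne]
                      have hP : pvP cs i = false := by
                        rcases not_and_or.mp hne with hl | hr
                        · have : decide (PySem.Chars.strip (cs.take i) ≠ []) = false :=
                            decide_eq_false hl
                          simp [pvP, this]
                        · have : decide (PySem.Chars.strip (cs.drop (i+5)) ≠ []) = false :=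
                            decide_eq_false hr
                          simp [pvP, this]
                      rw [hP, if_neg Bool.false_ne_true]
                      exact hrec
                  · have hP : pvP cs i = false := by
                      rcases not_and_or.mp hm with hdz | hs
                      · refine pvP_false_of_not_top cs i ?_
                        rw [htop]
                        have : (depth == 0) = false := by
                          simp only [beq_eq_false_iff_ne, ne_eq]
                          exact hdz
                        simp [this]
                      · exact pvP_false_of_not_prefix cs i ((pvPrefix_iff cs i).not.mp hs)
                    rw [if_neg hm, hP, if_neg Bool.false_ne_true]
                    exact hrec
            · rw [if_neg htl]
              have hor : insg = true ∨ ind = true := by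
                rcases not_and_or.mp htl with h1 | h2
                · exact Or.inl (not_not.mp h1)
                · exact Or.inr (not_not.mp h2)
              have hP : pvP cs i = false := by
                refine pvP_false_of_not_top cs i ?_
                rw [htop]
                rcases hor with h1 | h1 <;> rw [h1] <;> simp
              rw [hP, if_neg Bool.false_ne_true]
              exact pvGoA_spec cs fuel (i+1) insg ind false depth
                (by omega) (hnext _ (by
                  simp only [pvStep]
                  rw [if_neg Bool.false_ne_true, if_neg hbs, if_neg hq1, if_neg hq2,
                    if_pos hor]))
  · rw [pvGoA, pvSpec_ge cs i (by omega)]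
    simp [h]

-- if the pattern prefixes no suffix at or after start, pvP fails everywhere at or after start
theorem pvNoMatch_all (cs : List Char) (start j : Nat) (hj : start ≤ j)
    (hni : ¬ (" else".toList <:+: cs.drop start)) : pvP cs j = false := by
  have : ¬ (" else".toList <+: cs.drop j) := by
    intro hpre
    apply hni
    have hdd : cs.drop j = (cs.drop start).drop (j - start) := by
      rw [List.drop_drop]; congr 1; omega
    rw [hdd] at hpre
    exact hpre.isInfix.trans (List.drop_suffix _ _).isInfix
  exact pvP_false_of_not_prefix cs j this

-- the spec, unfolded at the next pattern occurrence idx after start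
theorem pvSpec_at (cs : List Char) (start idx : Nat) (hstartle : start ≤ idx)
    (hpre : (" else".toList <+: cs.drop idx))
    (hmin : ∀ i, start ≤ i → i < idx → ¬ (" else".toList <+: cs.drop i)) :
    pvSpec cs start = if pvIsTopLevel cs idx ∧ PySem.Chars.strip (cs.take idx) ≠ [] ∧
        PySem.Chars.strip (cs.drop (idx+5)) ≠ [] then pvRes cs idx else pvSpec cs (idx+1) := by
  have hlt : idx < cs.length := by
    have := hpre.length_le
    simp at this; omega
  have hskip : pvSpec cs start = pvSpec cs idx :=
    pvSpec_skip cs start idx hstartle (fun j hj1 hj2 =>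
      pvP_false_of_not_prefix cs j (hmin j hj1 hj2))
  rw [hskip, pvSpec_step cs idx hlt]
  by_cases hc : pvIsTopLevel cs idx ∧ PySem.Chars.strip (cs.take idx) ≠ [] ∧
      PySem.Chars.strip (cs.drop (idx+5)) ≠ []
  · have hP : pvP cs idx = true := by
      have h1 := decide_eq_true hpre
      have h2 := decide_eq_true hc.2.1
      have h3 := decide_eq_true hc.2.2
      simp only [pvP, hc.1, h1, h2, h3, Bool.and_self]
    rw [hP, if_pos rfl, if_pos hc]
  · have hP : pvP cs idx = false := by
      rcases not_and_or.mp hc with h1 | h2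
      · refine pvP_false_of_not_top cs idx ?_
        cases hb : pvIsTopLevel cs idx
        · rfl
        · exact absurd hb h1
      · rcases not_and_or.mp h2 with hl | hr
        · have hd : decide (PySem.Chars.strip (cs.take idx) ≠ []) = false := decide_eq_false hl
          simp only [pvP, hd, Bool.and_false, Bool.false_and]
        · have hd : decide (PySem.Chars.strip (cs.drop (idx+5)) ≠ []) = false := decide_eq_false hr
          simp only [pvP, hd, Bool.and_false]
    rw [hP, if_neg Bool.false_ne_true, if_neg hc]

-- B's loop computes pvSpec
theorem pvGoB_spec (cs : List Char) (fuel : Nat) (start : Nat) (hs : start ≤ cs.length)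
    (hf : cs.length < start + fuel) :
    pvGoB cs fuel start = pvSpec cs start := by
  match fuel with
  | 0 => omega
  | fuel + 1 =>
  rw [pvGoB]
  by_cases hr : PySem.Chars.findFrom cs " else".toList (start : Int) none = -1
  · simp only [hr, if_true]
    have hni := (PySem.Chars.findFrom_natCast_eq_neg_one_iff cs " else".toList start hs).mp hr
    have hfind : pvFind cs start = none := by
      apply List.find?_eq_none.mpr
      intro j hj
      have hjr : start ≤ j ∧ j < start + (cs.length - start) := by simpa using hj
      simp only [Bool.not_eq_true]
      exact pvNoMatch_all cs start j hjr.1 hni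
    simp [pvSpec, hfind]
  · simp only [hr, if_false]
    have hspec := PySem.Chars.findFrom_natCast_spec cs " else".toList start hs hr
    have hstartle : start ≤ (PySem.Chars.findFrom cs " else".toList (start : Int) none).toNat := by
      have := hspec.1
      omega
    have hlt : (PySem.Chars.findFrom cs " else".toList (start : Int) none).toNat < cs.length := by
      have hlen := hspec.2.1.length_le
      rw [List.length_drop] at hlen
      have hlen5 : (" else".toList).length = 5 := rfl
      rw [hlen5] at hlen
      omega
    rw [pvSpec_at cs start (PySem.Chars.findFrom cs " else".toList (start : Int) none).toNat
      hstartle hspec.2.1 hspec.2.2]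
    split_ifs with hc
    · rfl
    · exact pvGoB_spec cs fuel ((PySem.Chars.findFrom cs " else".toList (start : Int) none).toNat + 1)
        (by omega) (by omega)

-- ===== VERDICT (by name: the statement is the Claim_ definition above) =====
theorem split_top_level_else_py_spec : Claim_equal_split_top_level_else_py := by
  intro text _
  unfold Spec_split_top_level_else_py split_top_level_else_py split_top_level_else_py_alt
  rw [pvGoA_spec text.toList (text.toList.length + 1) 0 false false false 0 (by omega) (by simp),
    pvGoB_spec text.toList (text.toList.length + 1) 0 (Nat.zero_le _) (by omega)]
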